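-- pv_equiv track=rewrite | github.com/mdaghlian/dpu_mini | dpu_mini/utils.py | dag_hyphen_parse
-- ===== SOURCE A (Python) =====
-- def dag_hyphen_parse(str_prefix, str_in):
--     '''dag_hyphen_parse
--     checks whether a string has a prefix attached.
--     Useful for many BIDS format stuff, and when passing arguments on a lot
--     (sometimes it is not clear whether the prefix will be present or not...)
--
--     E.g., I want to make sure that string "task_name" has the format "task-A"
--     part_task_name = "A"
--     full_task_name = "task-A"
--
--     dag_hyphen_parse("task", part_task_name)
--     dag_hyphen_parse("task", full_task_name)
--
--     Both output -> "task-A"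
--
--     '''
--     if str_prefix in str_in:
--         str_out = str_in
--     else:
--         str_out = f'{str_prefix}-{str_in}'
--     # Check for multiple hyphen
--     while '--' in str_out:
--         str_out = str_out.replace('--', '-')
--     return str_out
-- ===== SOURCE B (Python) =====
-- def dag_hyphen_parse(str_prefix, str_in):
--     if str_prefix in str_in:
--         str_out = str_in
--     else:
--         str_out = f'{str_prefix}-{str_in}'
--     # single forward pass: keep a hyphen only when the last kept char is not a hyphen
--     kept = []
--     for ch in str_out:
--         if ch != '-' or not kept or kept[-1] != '-':
--             kept.append(ch)
--     return ''.join(kept)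
-- ===== Notes on version B (the rewrite author's own statement) =====
-- stated objective: alternative
-- what changed: The repeated str.replace('--','-') fixpoint loop is replaced by a single forward pass that appends each character unless it is a hyphen following a kept hyphen; the prefix branch is unchanged.
import Mathlib
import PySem

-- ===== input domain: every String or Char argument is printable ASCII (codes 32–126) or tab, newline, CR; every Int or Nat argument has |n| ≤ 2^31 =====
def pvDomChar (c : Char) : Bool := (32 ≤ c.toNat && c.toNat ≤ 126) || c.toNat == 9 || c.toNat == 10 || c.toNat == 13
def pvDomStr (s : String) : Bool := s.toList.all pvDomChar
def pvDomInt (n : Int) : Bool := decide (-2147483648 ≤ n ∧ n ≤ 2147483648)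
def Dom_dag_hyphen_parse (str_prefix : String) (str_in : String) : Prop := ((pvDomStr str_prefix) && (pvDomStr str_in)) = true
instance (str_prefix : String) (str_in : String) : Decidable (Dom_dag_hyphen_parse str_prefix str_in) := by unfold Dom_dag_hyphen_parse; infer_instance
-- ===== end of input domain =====

-- B changes only the hyphen-collapsing step: a single forward pass over the characters
-- instead of A's repeated str.replace('--','-') fixpoint loop; the prefix branch is unchanged.

-- ===== PORT A =====
-- The helper definitions and lemmas down to `pvReplaceShrinks` exist only to justify the
-- termination of A's `while '--' in str_out` loop (the string strictly shrinks on each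
-- replace); the port cites `pvReplaceShrinks` by name in its decreasing_by.

-- what one left-to-right replace pass '--' → '-' computes, written structurally
def pvRep : List Char → List Char
  | '-' :: '-' :: t => '-' :: pvRep t
  | c :: t => c :: pvRep t
  | [] => []

-- does the list contain two adjacent hyphens?
def pvHasDbl : List Char → Bool
  | '-' :: '-' :: _ => true
  | _ :: t => pvHasDbl t
  | [] => false

theorem pvRep_one (c : Char) : pvRep [c] = [c] := by
  rw [pvRep.eq_def]; split
  · rename_i heq; simp at heq
  · rename_i heq; injection heq with ha hb; subst ha; subst hb; rfl
  · rename_i heq; simp at heq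

theorem pvRep_cc (c c2 : Char) (t : List Char) :
    pvRep (c :: c2 :: t) = if c = '-' ∧ c2 = '-' then '-' :: pvRep t else c :: pvRep (c2 :: t) := by
  by_cases hc : c = '-' ∧ c2 = '-'
  · obtain ⟨h1, h2⟩ := hc; subst h1; subst h2; simp [pvRep]
  · rw [pvRep.eq_def]
    split
    · rename_i heq; injection heq with ha hb; injection hb with hb _; exact absurd ⟨ha, hb⟩ hc
    · rename_i heq; injection heq with ha hb; subst ha; subst hb; simp [hc]
    · rename_i heq; simp at heq

theorem pvHasDbl_one (c : Char) : pvHasDbl [c] = false := by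
  rw [pvHasDbl.eq_def]; split
  · rename_i heq; simp at heq
  · rename_i heq; injection heq with ha hb; subst hb; simp [pvHasDbl]
  · rename_i heq; simp at heq

theorem pvHasDbl_cc (c c2 : Char) (t : List Char) :
    pvHasDbl (c :: c2 :: t) = ((c = '-' ∧ c2 = '-') || pvHasDbl (c2 :: t)) := by
  by_cases hc : c = '-' ∧ c2 = '-'
  · obtain ⟨h1, h2⟩ := hc; subst h1; subst h2; simp [pvHasDbl]
  · rw [pvHasDbl.eq_def]
    split
    · rename_i heq; injection heq with ha hb; injection hb with hb _; exact absurd ⟨ha, hb⟩ hc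
    · rename_i heq; injection heq with ha hb; subst ha; subst hb; simp [hc]
    · rename_i heq; simp at heq

theorem pvGoEq (fuel : Nat) (l acc : List Char) (h : l.length ≤ fuel) :
    PySem.Chars.replace.go ['-', '-'] ['-'] fuel l acc = acc.reverse ++ pvRep l := by
  induction fuel generalizing l acc with
  | zero =>
    have : l = [] := by cases l <;> simp_all
    subst this
    simp [PySem.Chars.replace.go, pvRep]
  | succ fuel ih =>
    match l with
    | [] => simp [PySem.Chars.replace.go, pvRep]
    | [c] =>
      have hp : List.isPrefixOf ['-', '-'] [c] = false := by
        apply Bool.eq_false_iff.mpr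
        intro hT
        rw [List.isPrefixOf_iff_prefix, List.cons_prefix_cons] at hT
        simpa using hT.2
      rw [PySem.Chars.replace.go]
      simp only [hp, Bool.false_eq_true, if_false]
      rw [ih [] (c :: acc) (by simp)]
      simp [pvRep_one, pvRep]
    | c :: c2 :: t =>
      rw [PySem.Chars.replace.go]
      by_cases hc : c = '-' ∧ c2 = '-'
      · obtain ⟨h1, h2⟩ := hc; subst h1; subst h2
        have hp : List.isPrefixOf ['-', '-'] ('-' :: '-' :: t) = true := by
          rw [List.isPrefixOf_iff_prefix]
          simp [List.cons_prefix_cons]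
        simp only [hp, if_true]
        rw [ih _ _ (by simp at h ⊢; omega)]
        simp [pvRep]
      · have hp : List.isPrefixOf ['-', '-'] (c :: c2 :: t) = false := by
          apply Bool.eq_false_iff.mpr
          intro hT
          rw [List.isPrefixOf_iff_prefix, List.cons_prefix_cons] at hT
          obtain ⟨h1, hT⟩ := hT
          rw [List.cons_prefix_cons] at hT
          exact hc ⟨h1.symm, hT.1.symm⟩
        simp only [hp, Bool.false_eq_true, if_false]
        rw [ih _ _ (by simp at h ⊢; omega)]
        rw [pvRep_cc, if_neg hc]
        simp

theorem pvReplaceEq (s : List Char) :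
    PySem.Chars.replace s ['-', '-'] ['-'] = pvRep s := by
  rw [PySem.Chars.replace]
  simp only [List.isEmpty, Bool.false_eq_true, if_false]
  exact pvGoEq s.length s [] (le_refl _)

theorem pvRepLenLe (s : List Char) : (pvRep s).length ≤ s.length := by
  fun_induction pvRep s <;> simp <;> omega

theorem pvRepLt (s : List Char) (h : pvHasDbl s = true) : (pvRep s).length < s.length := by
  fun_induction pvRep s with
  | case1 t ih =>
    have := pvRepLenLe t
    simp; omega
  | case2 c t hne ih =>
    have ht : pvHasDbl t = true := by
      cases t with
      | nil => rw [pvHasDbl_one] at h; exact absurd h (by simp)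
      | cons c2 t2 =>
        rw [pvHasDbl_cc] at h
        have hcc : ¬ (c = '-' ∧ c2 = '-') := fun ⟨a, b⟩ => hne t2 a (by subst b; rfl)
        simpa [hcc] using h
    simpa using ih ht
  | case3 => simp [pvHasDbl] at h

theorem pvInfixIffHasDbl (s : List Char) : (['-', '-'] <:+: s) ↔ pvHasDbl s = true := by
  induction s with
  | nil => simp [pvHasDbl]
  | cons c t ih =>
    rw [List.infix_cons_iff]
    cases t with
    | nil =>
      rw [pvHasDbl_one]
      simp [List.cons_prefix_cons]
    | cons c2 t2 =>
      have hp : (['-', '-'] <+: c :: c2 :: t2) ↔ (c = '-' ∧ c2 = '-') := by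
        simp [List.cons_prefix_cons, eq_comm]
      rw [pvHasDbl_cc]
      simp [hp, ih]

theorem pvIsInEq (s : List Char) : PySem.Chars.isIn ['-', '-'] s = pvHasDbl s := by
  by_cases h : pvHasDbl s = true
  · rw [h, PySem.Chars.isIn_iff_infix]; exact (pvInfixIffHasDbl s).mpr h
  · rw [Bool.not_eq_true] at h
    rw [h, PySem.Chars.isIn_eq_false_iff]
    intro hc
    rw [pvInfixIffHasDbl s] at hc; simp_all

theorem pvReplaceShrinks (s : List Char) (h : PySem.Chars.isIn ['-', '-'] s = true) :
    (PySem.Chars.replace s ['-', '-'] ['-']).length < s.length := by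
  rw [pvReplaceEq]
  exact pvRepLt s (by rw [← pvIsInEq]; exact h)

-- the `while '--' in str_out: str_out = str_out.replace('--','-')` loop, literally
def pvLoopA (s : String) : String :=
  if PySem.Str.isIn "--" s then pvLoopA (PySem.Str.replace s "--" "-") else s
  termination_by s.toList.length
  decreasing_by
    rename_i h
    rw [PySem.Str.toList_replace]
    exact pvReplaceShrinks s.toList (by simpa using h)

def dag_hyphen_parse (str_prefix : String) (str_in : String) : String :=
  let str_out := if PySem.Str.isIn str_prefix str_in then str_in
                 else str_prefix ++ "-" ++ str_in
  pvLoopA str_out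

-- ===== PORT B =====
-- the single-pass loop: prev is the last kept character (none = nothing kept yet, so
-- Python's `not kept` is subsumed by `prev ≠ some '-'`)
def pvCollapseGo (prev : Option Char) : List Char → List Char
  | [] => []
  | c :: t => if c ≠ '-' ∨ prev ≠ some '-' then c :: pvCollapseGo (some c) t
              else pvCollapseGo prev t

def dag_hyphen_parse_alt (str_prefix : String) (str_in : String) : String :=
  let str_out := if PySem.Str.isIn str_prefix str_in then str_in
                 else str_prefix ++ "-" ++ str_in
  String.ofList (pvCollapseGo none str_out.toList)

-- ===== PRECONDITION & SPEC =====
def Spec_dag_hyphen_parse (str_prefix : String) (str_in : String) (out : String) : Prop := out = dag_hyphen_parse_alt str_prefix str_in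
instance (str_prefix : String) (str_in : String) (out : String) : Decidable (Spec_dag_hyphen_parse str_prefix str_in out) := by unfold Spec_dag_hyphen_parse; infer_instance

-- ===== CLAIM (what is proved, stated in full; the proofs are below) =====
def Claim_equal_dag_hyphen_parse : Prop := ∀ (str_prefix : String) (str_in : String), Dom_dag_hyphen_parse str_prefix str_in → Spec_dag_hyphen_parse str_prefix str_in (dag_hyphen_parse str_prefix str_in)

-- ===== LEMMAS AND PROOFS =====

-- one replace pass does not change the collapsed result, whatever the previous kept char is
theorem pvCollapseRep (s : List Char) (prev : Option Char) :
    pvCollapseGo prev (pvRep s) = pvCollapseGo prev s := by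
  fun_induction pvRep s generalizing prev with
  | case1 t ih =>
    by_cases hp : prev = some '-'
    · subst hp
      simp [pvCollapseGo, ih]
    · simp [pvCollapseGo, hp, ih]
  | case2 c t hne ih =>
    by_cases hk : c ≠ '-' ∨ prev ≠ some '-'
    · simp [pvCollapseGo, hk, ih]
    · simp only [ne_eq, not_or, not_not] at hk
      obtain ⟨h1, h2⟩ := hk
      subst h1; subst h2
      simp [pvCollapseGo, ih]
  | case3 => rfl

-- on a string with no adjacent hyphens the pass is the identity
theorem pvCollapseNoDbl (s : List Char) (prev : Option Char)
    (h : pvHasDbl s = false)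
    (hp : prev = some '-' → s.head? ≠ some '-') :
    pvCollapseGo prev s = s := by
  induction s generalizing prev with
  | nil => rfl
  | cons c t ih =>
    have hk : c ≠ '-' ∨ prev ≠ some '-' := by
      by_cases hc : c = '-'
      · right; intro hpe; exact hp hpe (by simp [hc])
      · left; exact hc
    rw [pvCollapseGo, if_pos hk]
    congr 1
    apply ih
    · cases t with
      | nil => rfl
      | cons c2 t2 =>
        rw [pvHasDbl_cc] at h
        exact (Bool.or_eq_false_iff.mp h).2
    · intro hce
      injection hce with hce
      subst hce
      cases t with
      | nil => simp
      | cons c2 t2 =>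
        rw [pvHasDbl_cc] at h
        simp only [ne_eq, List.head?_cons, Option.some.injEq]
        intro h2
        subst h2
        simp at h

theorem pvLoopAEq (s : String) : pvLoopA s = String.ofList (pvCollapseGo none s.toList) := by
  rw [pvLoopA]
  split
  · rename_i h
    rw [pvLoopAEq (PySem.Str.replace s "--" "-")]
    rw [PySem.Str.toList_replace]
    have h2 : ("--" : String).toList = ['-', '-'] := rfl
    have h1 : ("-" : String).toList = ['-'] := rfl
    rw [h2, h1, pvReplaceEq, pvCollapseRep]
  · rename_i h
    have h' : pvHasDbl s.toList = false := by
      have hn : ¬ PySem.Chars.isIn ['-', '-'] s.toList = true := by simpa using h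
      rw [pvIsInEq] at hn; simpa using hn
    rw [pvCollapseNoDbl s.toList none h' (by simp)]
    exact String.ofList_toList.symm
  termination_by s.toList.length
  decreasing_by
    rename_i h
    rw [PySem.Str.toList_replace]
    exact pvReplaceShrinks s.toList (by simpa using h)

-- ===== VERDICT (by name: the statement is the Claim_ definition above) =====
theorem dag_hyphen_parse_spec : Claim_equal_dag_hyphen_parse := by
  intro str_prefix str_in _
  unfold Spec_dag_hyphen_parse dag_hyphen_parse dag_hyphen_parse_alt
  exact pvLoopAEq _
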